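-- pv_equiv track=rewrite | github.com/giannpelle/data-profiling | UCC_discovery.py | get_intersected_row_pairs
-- ===== SOURCE A (Python) =====
-- def get_intersected_row_pairs(first_pli, second_pli):
--     prob_table = {}
--     for key, value in first_pli.items():
--         for v in value:
--             prob_table[v] = key
--
--     row_pairs = {}
--     for key, value in second_pli.items():
--         for v in value:
--             if v in prob_table:
--                 pair = ", ".join([str(key), str(prob_table[v])])
--                 if pair in row_pairs:
--                     row_pairs.get(pair).append(v)
--                 else:
--                     row_pairs.update({pair: [v]})
--
--     row_pairs = dict(filter(lambda x: len(x[1]) > 1, row_pairs.items()))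
--     return row_pairs
-- ===== SOURCE B (Python) =====
-- def get_intersected_row_pairs(first_pli, second_pli):
--     prob_table = {v: key for key, value in first_pli.items() for v in value}
--     pairs = [(", ".join([str(key), str(prob_table[v])]), v)
--              for key, value in second_pli.items()
--              for v in value if v in prob_table]
--     distinct_keys = list(dict.fromkeys(p for p, _ in pairs))
--     row_pairs = {}
--     for k in distinct_keys:
--         group = [v for p, v in pairs if p == k]
--         if len(group) > 1:
--             row_pairs[k] = group
--     return row_pairs
-- ===== Notes on version B (the rewrite author's own statement) =====
-- stated objective: alternative
-- what changed: B materialises the flat list of (pair-string, row) tuples, deduplicates the pair strings in first-occurrence order, and gathers each group by scanning that flat list per distinct key, instead of A's single-pass incremental dict-of-lists with a membership branch plus a final filter; it trades A's O(n) grouping for O(n*k) per-key scans.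
import Mathlib
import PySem

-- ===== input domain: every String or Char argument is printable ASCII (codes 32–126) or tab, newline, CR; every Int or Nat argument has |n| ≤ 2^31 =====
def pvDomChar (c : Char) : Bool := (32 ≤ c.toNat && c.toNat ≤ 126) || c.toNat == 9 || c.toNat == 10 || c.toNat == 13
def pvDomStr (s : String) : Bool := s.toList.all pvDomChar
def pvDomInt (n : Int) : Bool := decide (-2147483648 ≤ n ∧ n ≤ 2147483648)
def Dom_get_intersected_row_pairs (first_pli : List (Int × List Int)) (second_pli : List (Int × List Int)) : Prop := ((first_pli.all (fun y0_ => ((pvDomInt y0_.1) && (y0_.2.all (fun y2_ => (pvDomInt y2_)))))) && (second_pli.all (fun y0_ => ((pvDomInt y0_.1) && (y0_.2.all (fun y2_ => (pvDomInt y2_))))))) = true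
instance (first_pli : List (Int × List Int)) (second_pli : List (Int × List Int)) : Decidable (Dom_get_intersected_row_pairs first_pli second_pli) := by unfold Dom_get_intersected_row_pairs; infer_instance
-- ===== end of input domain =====

-- B flattens the matches into a (pair-string, row) list, deduplicates the pair strings in
-- first-occurrence order, and gathers each group by a per-key scan of that flat list — an
-- alternative decomposition (no incremental dict-of-lists, no final filter pass), same values.

-- ===== PORT A =====
def get_intersected_row_pairs (first_pli : List (Int × List Int)) (second_pli : List (Int × List Int)) : List (String × List Int) :=
  -- prob_table[v] = key, last write wins
  let prob_table : PySem.Dict Int Int :=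
    first_pli.foldl (fun d kv => kv.2.foldl (fun d v => d.insert v kv.1) d) PySem.Dict.empty
  -- row_pairs: incremental dict of lists (if pair in row_pairs: append else: fresh [v])
  let row_pairs : PySem.Dict String (List Int) :=
    second_pli.foldl (fun rp kv =>
      kv.2.foldl (fun rp v =>
        match prob_table.get? v with
        | some pv =>
          let pair := PySem.Str.join ", " [PySem.Int.toStr kv.1, PySem.Int.toStr pv]
          if rp.contains pair then rp.modify pair [] (fun g => g ++ [v])
          else rp.insert pair [v]
        | none => rp) rp) PySem.Dict.empty
  -- dict(filter(lambda x: len(x[1]) > 1, row_pairs.items()))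
  row_pairs.items.filter (fun x => x.2.length > 1)

-- ===== PORT B =====
def get_intersected_row_pairs_alt (first_pli : List (Int × List Int)) (second_pli : List (Int × List Int)) : List (String × List Int) :=
  -- prob_table = {v: key for ...}
  let prob_table : PySem.Dict Int Int :=
    first_pli.foldl (fun d kv => kv.2.foldl (fun d v => d.insert v kv.1) d) PySem.Dict.empty
  -- pairs = [(", ".join([str(key), str(prob_table[v])]), v) ...]
  let pairs : List (String × Int) :=
    second_pli.flatMap (fun kv =>
      kv.2.filterMap (fun v =>
        (prob_table.get? v).map (fun pv =>
          (PySem.Str.join ", " [PySem.Int.toStr kv.1, PySem.Int.toStr pv], v))))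
  -- distinct_keys = list(dict.fromkeys(p for p, _ in pairs))
  let distinct_keys : List String := PySem.List.dedup (pairs.map Prod.fst)
  -- for k in distinct_keys: group = [v for p, v in pairs if p == k]; keep if len > 1
  distinct_keys.filterMap (fun k =>
    let group := (pairs.filter (fun q => q.1 == k)).map (fun q => q.2)
    if group.length > 1 then some (k, group) else none)

-- ===== PRECONDITION & SPEC =====
def Spec_get_intersected_row_pairs (first_pli : List (Int × List Int)) (second_pli : List (Int × List Int)) (out : List (String × List Int)) : Prop := out = get_intersected_row_pairs_alt first_pli second_pli
instance (first_pli : List (Int × List Int)) (second_pli : List (Int × List Int)) (out : List (String × List Int)) : Decidable (Spec_get_intersected_row_pairs first_pli second_pli out) := by unfold Spec_get_intersected_row_pairs; infer_instance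

-- ===== CLAIM (what is proved, stated in full; the proofs are below) =====
def Claim_equal_get_intersected_row_pairs : Prop := ∀ (first_pli : List (Int × List Int)) (second_pli : List (Int × List Int)), Dom_get_intersected_row_pairs first_pli second_pli → Spec_get_intersected_row_pairs first_pli second_pli (get_intersected_row_pairs first_pli second_pli)

-- ===== LEMMAS AND PROOFS =====

-- foldl over a filterMap is the loop that skips the `none` elements
theorem pv_foldl_filterMap {α β σ : Type} (l : List α) (f : α → Option β) (g : σ → β → σ) (init : σ) :
    (l.filterMap f).foldl g init
      = l.foldl (fun acc x => match f x with | some b => g acc b | none => acc) init := by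
  induction l generalizing init with
  | nil => rfl
  | cons x xs ih => cases h : f x <;> simp [h, ih]

-- foldl over a flatMap is the nested loop
theorem pv_foldl_flatMap {α β σ : Type} (l : List α) (f : α → List β) (g : σ → β → σ) (init : σ) :
    (l.flatMap f).foldl g init = l.foldl (fun acc x => (f x).foldl g acc) init := by
  induction l generalizing init with
  | nil => rfl
  | cons x xs ih => simp [List.foldl_append, ih]

-- A's if/else update step is exactly `modify` with default []
theorem pv_step_eq_modify (rp : PySem.Dict String (List Int)) (p : String × Int) :
    (if rp.contains p.1 then rp.modify p.1 [] (fun g => g ++ [p.2]) else rp.insert p.1 [p.2])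
      = rp.modify p.1 [] (fun g => g ++ [p.2]) := by
  by_cases h : rp.contains p.1
  · simp [h]
  · have h' : rp.contains p.1 = false := by simpa using h
    have h2 : rp.getD p.1 [] = [] := by
      simp [PySem.Dict.getD, (PySem.Dict.get?_eq_none_iff_contains rp p.1).mpr h']
    simp [h', PySem.Dict.insert, PySem.Dict.modify, h2]

-- items of the grouping fold: distinct keys in first-occurrence order, each with its gathered values
theorem pv_group_items (ps : List (String × Int)) :
    (ps.foldl (fun d p => d.modify p.1 [] (fun g => g ++ [p.2])) (PySem.Dict.empty : PySem.Dict String (List Int))).items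
      = (PySem.List.dedup (ps.map Prod.fst)).map
          (fun k => (k, (ps.filter (fun q => q.1 == k)).map (fun q => q.2))) := by
  have hnd : (ps.foldl (fun d p => d.modify p.1 [] (fun g => g ++ [p.2])) (PySem.Dict.empty : PySem.Dict String (List Int))).keys.Nodup := by
    apply PySem.Dict.nodup_keys_foldl_modify_key ps Prod.fst [] (fun _ p => (fun g => g ++ [p.2]))
    simp [PySem.Dict.keys_empty]
  rw [PySem.Dict.items_eq_map_keys _ hnd [],
      PySem.Dict.keys_foldl_modify_key ps Prod.fst [] (fun _ p => (fun g => g ++ [p.2]))]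
  simp only [PySem.Dict.keys_empty, PySem.Set.update_nil_left, ← PySem.List.dedup_eq_ofList]
  refine List.map_congr_left (fun k hk => ?_)
  rw [PySem.Dict.getD_foldl_modify_append ps PySem.Dict.empty k]
  simp [PySem.Dict.getD_empty]

-- mapping after a filter is the filterMap with the guard inlined
theorem pv_map_filter_eq_filterMap {α β : Type} (l : List α) (f : α → β) (p : β → Bool) :
    (l.filter (p ∘ f)).map f = l.filterMap (fun x => if p (f x) then some (f x) else none) := by
  induction l with
  | nil => rfl
  | cons x xs ih => by_cases h : p (f x) <;> simp [h, ih, Function.comp]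

-- ===== VERDICT (by name: the statement is the Claim_ definition above) =====
theorem get_intersected_row_pairs_spec : Claim_equal_get_intersected_row_pairs := by
  intro first_pli second_pli _
  unfold Spec_get_intersected_row_pairs
  unfold get_intersected_row_pairs get_intersected_row_pairs_alt
  set pt : PySem.Dict Int Int :=
    first_pli.foldl (fun d kv => kv.2.foldl (fun d v => d.insert v kv.1) d) PySem.Dict.empty with hpt
  -- rewrite A's nested loop as a fold over the flat filterMap/flatMap list
  have hps : ∀ (kv : Int × List Int) (rp : PySem.Dict String (List Int)),
      kv.2.foldl (fun rp v =>
          match pt.get? v with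
          | some pv =>
            if rp.contains (PySem.Str.join ", " [PySem.Int.toStr kv.1, PySem.Int.toStr pv])
            then rp.modify (PySem.Str.join ", " [PySem.Int.toStr kv.1, PySem.Int.toStr pv]) [] (fun g => g ++ [v])
            else rp.insert (PySem.Str.join ", " [PySem.Int.toStr kv.1, PySem.Int.toStr pv]) [v]
          | none => rp) rp
      = (kv.2.filterMap (fun v =>
            (pt.get? v).map (fun pv =>
              (PySem.Str.join ", " [PySem.Int.toStr kv.1, PySem.Int.toStr pv], v)))).foldl
          (fun rp b => if rp.contains b.1 then rp.modify b.1 [] (fun g => g ++ [b.2])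
                       else rp.insert b.1 [b.2]) rp := by
    intro kv rp
    rw [pv_foldl_filterMap]
    exact PySem.List.foldl_congr_mem _ _ _ _ (fun acc x _ => by
      cases pt.get? x
      · simp
      · simp)
  simp only [hps]
  rw [← pv_foldl_flatMap]
  simp only [pv_step_eq_modify]
  rw [pv_group_items]
  -- filter after map = filterMap with the guard inlined
  set ps : List (String × Int) := second_pli.flatMap (fun kv =>
      kv.2.filterMap (fun v =>
        (pt.get? v).map (fun pv =>
          (PySem.Str.join ", " [PySem.Int.toStr kv.1, PySem.Int.toStr pv], v)))) with hpsdef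
  rw [List.filter_map, pv_map_filter_eq_filterMap]
  simp only [decide_eq_true_eq]
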